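-- pv_equiv track=rewrite | github.com/AlexGidman/AoC-2020 | Day11/Day11.py | check_left_up_diagonal
-- ===== SOURCE A (Python) =====
-- def check_left_up_diagonal(row, column, seating, width, height) -> int:
--     if row == 0 or column == 0:
--         return 0
--     if seating[row-1][column-1] == '#':
--         return 1
--     if seating[row-1][column-1] == 'L':
--         return 0
--     row -= 1
--     column -= 1
--     return check_left_up_diagonal(row, column, seating, width, height)
-- ===== SOURCE B (Python) =====
-- def check_left_up_diagonal(row, column, seating, width, height) -> int:
--     while row != 0 and column != 0:
--         cell = seating[row - 1][column - 1]
--         if cell == '#':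
--             return 1
--         if cell == 'L':
--             return 0
--         row -= 1
--         column -= 1
--     return 0
-- ===== Notes on version B (the rewrite author's own statement) =====
-- stated objective: idiomatic
-- what changed: Replaced the tail recursion by an explicit while loop that walks the up-left diagonal in place, binding each cell once instead of indexing twice; the border case becomes the loop's exit instead of a base-case return.
import Mathlib
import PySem

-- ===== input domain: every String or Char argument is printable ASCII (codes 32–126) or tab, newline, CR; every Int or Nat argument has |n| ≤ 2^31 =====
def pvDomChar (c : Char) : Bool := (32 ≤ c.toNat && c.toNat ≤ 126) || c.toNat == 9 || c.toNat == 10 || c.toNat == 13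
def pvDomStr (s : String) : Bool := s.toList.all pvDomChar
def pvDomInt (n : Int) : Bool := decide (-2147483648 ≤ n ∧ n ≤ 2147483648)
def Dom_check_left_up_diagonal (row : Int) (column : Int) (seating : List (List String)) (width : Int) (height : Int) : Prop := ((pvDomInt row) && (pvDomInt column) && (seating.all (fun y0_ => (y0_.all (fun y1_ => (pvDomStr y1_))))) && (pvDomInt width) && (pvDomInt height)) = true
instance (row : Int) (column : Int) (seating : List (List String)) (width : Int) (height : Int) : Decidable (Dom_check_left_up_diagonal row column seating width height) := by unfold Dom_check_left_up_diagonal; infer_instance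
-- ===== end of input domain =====

-- B replaces A's tail recursion by an explicit while loop over the same diagonal walk,
-- reading each cell once (idiomatic rewrite, same cost); B matches A on every input on
-- which A returns, including negative-index wraparound and ragged grids.

-- ===== PORT A =====
-- A's tail recursion, made total with a fuel counter; the wrapper passes
-- (row + len(seating)).toNat + 1, which exceeds the recursion depth on every input on
-- which the Python returns (each recursive call needs row - 1 ≥ -len(seating)).
-- The 'none' branches are Python IndexError, outside Pre_.
def pvAGo (seating : List (List String)) : Nat → Int → Int → Int
  | 0, _, _ => 0
  | Nat.succ fuel, row, column =>
    if row = 0 ∨ column = 0 then 0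
    else
      match PySem.List.pyGet? seating (row - 1) with
      | none => 0  -- IndexError in Python; excluded by Pre_
      | some r =>
        match PySem.List.pyGet? r (column - 1) with
        | none => 0  -- IndexError in Python; excluded by Pre_
        | some c =>
          if c = "#" then 1
          else if c = "L" then 0
          else pvAGo seating fuel (row - 1) (column - 1)

def check_left_up_diagonal (row : Int) (column : Int) (seating : List (List String)) (width : Int) (height : Int) : Int :=
  pvAGo seating ((row + seating.length).toNat + 1) row column

-- ===== PORT B =====
-- B's while loop: guard row ≠ 0 ∧ column ≠ 0, one cell read per iteration, state updated
-- in place; a genuine well-founded loop (measure (row + seating.length).toNat: a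
-- successful read forces row - 1 ≥ -len(seating)). 'none' = Python IndexError, outside Pre_.
def pvBLoop (seating : List (List String)) (row column : Int) : Int :=
  if row ≠ 0 ∧ column ≠ 0 then
    match h : (PySem.List.pyGet? seating (row - 1)).bind (fun r => PySem.List.pyGet? r (column - 1)) with
    | some cell =>
      if cell = "#" then 1
      else if cell = "L" then 0
      else pvBLoop seating (row - 1) (column - 1)
    | none => 0  -- IndexError in Python; excluded by Pre_
  else 0
termination_by (row + seating.length).toNat
decreasing_by
  have hne : ¬ PySem.List.pyGet? seating (row - 1) = none := by
    intro hg; rw [hg] at h; simp at h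
  rw [PySem.List.pyGet?_eq_none_iff seating (row - 1)] at hne
  unfold PySem.Raise.InRange at hne
  omega

def check_left_up_diagonal_alt (row : Int) (column : Int) (seating : List (List String)) (width : Int) (height : Int) : Int :=
  pvBLoop seating row column

-- ===== PRECONDITION & SPEC =====
-- The cell the walk inspects at step k (none = that index pair raises IndexError in Python).
def pvCell? (seating : List (List String)) (row column : Int) (k : Nat) : Option String :=
  (PySem.List.pyGet? seating (row - 1 - k)).bind (fun r => PySem.List.pyGet? r (column - 1 - k))

-- 'the walk continues past step k': neither coordinate has hit the border, the cell at
-- step k exists, and it is neither '#' nor 'L'.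
def pvContB (seating : List (List String)) (row column : Int) (k : Nat) : Bool :=
  decide (row - k ≠ 0) && decide (column - k ≠ 0) &&
    (match pvCell? seating row column k with
     | some c => !(c == "#") && !(c == "L")
     | none => false)

-- Pre_ excludes exactly the inputs on which Python A raises IndexError: every step the
-- walk actually reaches must hit the border or read an in-range cell. On every input it
-- admits A returns an ordinary value, and B reproduces it (wraparound and ragged grids
-- included). A reachable step k ≥ 1 has both row - 1 and row - k inside the index window
-- [-len, len), so k ≤ 2·len and the range bound covers every reachable step.
def Pre_check_left_up_diagonal (row : Int) (column : Int) (seating : List (List String)) (width : Int) (height : Int) : Prop :=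
  ∀ k ∈ List.range (2 * seating.length + 2),
    (∀ j ∈ List.range k, pvContB seating row column j = true) →
    (row - k = 0 ∨ column - k = 0 ∨ pvCell? seating row column k ≠ none)
instance (row : Int) (column : Int) (seating : List (List String)) (width : Int) (height : Int) : Decidable (Pre_check_left_up_diagonal row column seating width height) := by unfold Pre_check_left_up_diagonal; infer_instance

def pvWitness_check_left_up_diagonal : Int × Int × List (List String) × Int × Int :=
  (2, 2, [[".", "."], [".", "#"]], 2, 2)

def Spec_check_left_up_diagonal (row : Int) (column : Int) (seating : List (List String)) (width : Int) (height : Int) (out : Int) : Prop := out = check_left_up_diagonal_alt row column seating width height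
instance (row : Int) (column : Int) (seating : List (List String)) (width : Int) (height : Int) (out : Int) : Decidable (Spec_check_left_up_diagonal row column seating width height out) := by unfold Spec_check_left_up_diagonal; infer_instance

-- ===== CLAIM (what is proved, stated in full; the proofs are below) =====
def Claim_equal_check_left_up_diagonal : Prop := ∀ (row : Int) (column : Int) (seating : List (List String)) (width : Int) (height : Int), Dom_check_left_up_diagonal row column seating width height → Pre_check_left_up_diagonal row column seating width height → Spec_check_left_up_diagonal row column seating width height (check_left_up_diagonal row column seating width height)

-- ===== LEMMAS AND PROOFS =====
theorem pvWitness_ok :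
    Dom_check_left_up_diagonal (pvWitness_check_left_up_diagonal.1) (pvWitness_check_left_up_diagonal.2.1) (pvWitness_check_left_up_diagonal.2.2.1) (pvWitness_check_left_up_diagonal.2.2.2.1) (pvWitness_check_left_up_diagonal.2.2.2.2) ∧
    Pre_check_left_up_diagonal (pvWitness_check_left_up_diagonal.1) (pvWitness_check_left_up_diagonal.2.1) (pvWitness_check_left_up_diagonal.2.2.1) (pvWitness_check_left_up_diagonal.2.2.2.1) (pvWitness_check_left_up_diagonal.2.2.2.2) := by
  decide

theorem pvBLoop_border (seating : List (List String)) (row column : Int)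
    (h : row = 0 ∨ column = 0) : pvBLoop seating row column = 0 := by
  rw [pvBLoop]
  have : ¬ (row ≠ 0 ∧ column ≠ 0) := by tauto
  rw [if_neg this]

theorem pvBLoop_none (seating : List (List String)) (row column : Int)
    (hg : row ≠ 0 ∧ column ≠ 0)
    (hn : (PySem.List.pyGet? seating (row - 1)).bind
        (fun r => PySem.List.pyGet? r (column - 1)) = none) :
    pvBLoop seating row column = 0 := by
  rw [pvBLoop, if_pos hg]
  split
  · next cell' hcell' => rw [hn] at hcell'; cases hcell'
  · rfl

theorem pvBLoop_step (seating : List (List String)) (row column : Int) (cell : String)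
    (hg : row ≠ 0 ∧ column ≠ 0)
    (hcell : (PySem.List.pyGet? seating (row - 1)).bind
        (fun r => PySem.List.pyGet? r (column - 1)) = some cell) :
    pvBLoop seating row column =
      if cell = "#" then 1 else if cell = "L" then 0
      else pvBLoop seating (row - 1) (column - 1) := by
  rw [pvBLoop, if_pos hg]
  split
  · next cell' hcell' => rw [hcell] at hcell'; cases hcell'; rfl
  · next hnone => rw [hcell] at hnone; cases hnone

-- With fuel exceeding (row + len(seating)).toNat, port A's fuel recursion computes
-- port B's loop on every input (no precondition needed: the sentinel branches agree too).
theorem pvGo_eq (seating : List (List String)) :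
    ∀ (n : Nat) (row column : Int), (row + seating.length).toNat < n →
      pvAGo seating n row column = pvBLoop seating row column := by
  intro n
  induction n with
  | zero => intro row column hlt; omega
  | succ m ih =>
    intro row column hlt
    by_cases hb : row = 0 ∨ column = 0
    · simp [pvAGo, if_pos hb, pvBLoop_border seating row column hb]
    · have hg : row ≠ 0 ∧ column ≠ 0 := by tauto
      rcases h1 : PySem.List.pyGet? seating (row - 1) with _ | r
      · rw [pvBLoop_none seating row column hg (by rw [h1]; rfl)]
        simp [pvAGo, if_neg hb, h1]
      · have hr1 : -(seating.length : Int) ≤ row - 1 ∧ row - 1 < seating.length := by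
          have hne : ¬ PySem.List.pyGet? seating (row - 1) = none := by
            rw [h1]; simp
          rw [PySem.List.pyGet?_eq_none_iff seating (row - 1)] at hne
          unfold PySem.Raise.InRange at hne
          omega
        rcases h2 : PySem.List.pyGet? r (column - 1) with _ | c
        · rw [pvBLoop_none seating row column hg (by rw [h1]; simpa using h2)]
          simp [pvAGo, if_neg hb, h1, h2]
        · rw [pvBLoop_step seating row column c hg (by rw [h1]; simpa using h2)]
          simp only [pvAGo, if_neg hb, h1, h2]
          by_cases hc1 : c = "#"
          · simp [hc1]
          · by_cases hc2 : c = "L"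
            · simp [hc1, hc2]
            · simp only [if_neg hc1, if_neg hc2]
              exact ih (row - 1) (column - 1) (by omega)

-- ===== VERDICT (by name: the statement is the Claim_ definition above) =====
theorem check_left_up_diagonal_spec : Claim_equal_check_left_up_diagonal := by
  intro row column seating width height _ _hpre
  unfold Spec_check_left_up_diagonal check_left_up_diagonal check_left_up_diagonal_alt
  exact pvGo_eq seating _ row column (by omega)
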